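-- pv_equiv track=rewrite | github.com/YB102-Team1/iNDIEVOX-Recommend | _asset/python/MapReduce.py | count_ratings_users_freq
-- ===== SOURCE A (Python) =====
-- def count_ratings_users_freq(user_id, values):
--     item_count = 0
--     item_sum = 0
--     final = []
--     for item_id, rating, ratings_count in values:
--         item_count += 1
--         item_sum += rating
--         final.append((item_id, rating, ratings_count))
--
--     yield user_id, (item_count, item_sum, final)
-- ===== SOURCE B (Python) =====
-- def count_ratings_users_freq(user_id, values):
--     def go(vs, lo, hi):
--         # divide and conquer: summarize vs[lo:hi] into (count, rating_sum, repacked list)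
--         if hi - lo == 0:
--             return (0, 0, [])
--         if hi - lo == 1:
--             item_id, rating, ratings_count = vs[lo]
--             return (1, rating, [(item_id, rating, ratings_count)])
--         mid = (lo + hi) // 2
--         c1, s1, f1 = go(vs, lo, mid)
--         c2, s2, f2 = go(vs, mid, hi)
--         return (c1 + c2, s1 + s2, f1 + f2)
--
--     vs = list(values)
--     yield user_id, go(vs, 0, len(vs))
-- ===== Notes on version B (the rewrite author's own statement) =====
-- stated objective: alternative
-- what changed: Replaces A's single left-to-right accumulating loop with a divide-and-conquer recursion that splits the list in half, summarizes each half into a (count, sum, repacked-list) triple and merges the triples; correct because count, sum and concatenation are associative.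
import Mathlib
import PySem

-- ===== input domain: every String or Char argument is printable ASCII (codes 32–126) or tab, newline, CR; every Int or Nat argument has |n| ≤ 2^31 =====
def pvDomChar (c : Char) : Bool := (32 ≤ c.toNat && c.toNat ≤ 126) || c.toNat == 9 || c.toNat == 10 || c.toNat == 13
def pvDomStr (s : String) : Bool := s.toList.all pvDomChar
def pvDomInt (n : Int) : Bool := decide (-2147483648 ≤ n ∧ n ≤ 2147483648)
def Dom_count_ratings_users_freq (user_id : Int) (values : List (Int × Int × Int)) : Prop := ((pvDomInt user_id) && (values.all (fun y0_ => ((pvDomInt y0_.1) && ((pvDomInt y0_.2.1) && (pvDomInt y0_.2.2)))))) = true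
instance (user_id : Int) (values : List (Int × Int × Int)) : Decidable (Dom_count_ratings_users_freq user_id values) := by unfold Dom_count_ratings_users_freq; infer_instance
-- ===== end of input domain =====

-- B replaces A's single accumulating loop by a divide-and-conquer recursion that
-- splits the list in half and merges (count, sum, final) summaries — objective: alternative.

-- ===== PORT A =====
-- A's loop accumulates (item_count, item_sum, final) in one pass; the generator yields one pair.
def count_ratings_users_freq (user_id : Int) (values : List (Int × Int × Int)) : List (Int × (Int × Int × (List (Int × Int × Int)))) :=
  let st := values.foldl
    (fun (acc : Int × Int × List (Int × Int × Int)) v =>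
      (acc.1 + 1, acc.2.1 + v.2.1, acc.2.2 ++ [(v.1, v.2.1, v.2.2)]))
    (0, 0, [])
  [(user_id, (st.1, st.2.1, st.2.2))]

-- ===== PORT B =====
-- B's recursive splitter `go(vs, lo, hi)`: the segment vs[lo:hi] is `take`/`drop` here;
-- mid = (lo+hi)//2 corresponds to splitting the segment at half its length. The extra
-- fuel argument (initialised to the list length) only makes the recursion structural;
-- it never runs out on the actual calls.
def crufGo : Nat → List (Int × Int × Int) → Int × Int × List (Int × Int × Int)
  | _, [] => (0, 0, [])
  | _, [v] => (1, v.2.1, [(v.1, v.2.1, v.2.2)])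
  | 0, _ => (0, 0, [])  -- unreachable: fuel starts at the length and dominates the recursion depth
  | f + 1, a :: b :: rest =>
    let vs := a :: b :: rest
    let mid := vs.length / 2
    let l := crufGo f (vs.take mid)
    let r := crufGo f (vs.drop mid)
    (l.1 + r.1, l.2.1 + r.2.1, l.2.2 ++ r.2.2)

def count_ratings_users_freq_alt (user_id : Int) (values : List (Int × Int × Int)) : List (Int × (Int × Int × (List (Int × Int × Int)))) :=
  [(user_id, crufGo values.length values)]

-- ===== PRECONDITION & SPEC =====
def Spec_count_ratings_users_freq (user_id : Int) (values : List (Int × Int × Int)) (out : List (Int × (Int × Int × (List (Int × Int × Int))))) : Prop := out = count_ratings_users_freq_alt user_id values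
instance (user_id : Int) (values : List (Int × Int × Int)) (out : List (Int × (Int × Int × (List (Int × Int × Int))))) : Decidable (Spec_count_ratings_users_freq user_id values out) := by unfold Spec_count_ratings_users_freq; exact @instDecidableEqList _ (@instDecidableEqProd _ _ _ inferInstance) _ _

-- ===== CLAIM (what is proved, stated in full; the proofs are below) =====
def Claim_equal_count_ratings_users_freq : Prop := ∀ (user_id : Int) (values : List (Int × Int × Int)), Dom_count_ratings_users_freq user_id values → Spec_count_ratings_users_freq user_id values (count_ratings_users_freq user_id values)

-- ===== LEMMAS AND PROOFS =====
-- Closed characterisation of B's divide-and-conquer summary (fuel suffices).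
theorem crufGo_eq (fuel : Nat) (vs : List (Int × Int × Int)) (hf : vs.length ≤ fuel) :
    crufGo fuel vs = ((vs.length : Int), (vs.map (fun v => v.2.1)).sum,
                 vs.map (fun v => (v.1, v.2.1, v.2.2))) := by
  induction fuel generalizing vs with
  | zero =>
    match vs, hf with
    | [], _ => rfl
  | succ f ih =>
    match vs, hf with
    | [], _ => rfl
    | [v], _ => simp [crufGo]
    | a :: b :: rest, hf =>
      rw [crufGo]
      have hlen : (a :: b :: rest).length = rest.length + 2 := by simp
      have h1 : ((a :: b :: rest).take ((a :: b :: rest).length / 2)).length ≤ f := by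
        simp [List.length_take] at *; omega
      have h2 : ((a :: b :: rest).drop ((a :: b :: rest).length / 2)).length ≤ f := by
        simp at *; omega
      simp only [ih _ h1, ih _ h2]
      have h := List.take_append_drop ((a :: b :: rest).length / 2) (a :: b :: rest)
      refine Prod.ext ?_ (Prod.ext ?_ ?_)
      · simp [List.length_take]
        omega
      · conv_rhs => rw [← h]
        simp
      · conv_rhs => rw [← h]
        simp

-- Invariant of A's fold: starting from (c, s, f) it adds the length, the rating sum and the re-packed elements.
theorem crufA_foldl (values : List (Int × Int × Int)) (c s : Int) (f : List (Int × Int × Int)) :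
    values.foldl
      (fun (acc : Int × Int × List (Int × Int × Int)) v =>
        (acc.1 + 1, acc.2.1 + v.2.1, acc.2.2 ++ [(v.1, v.2.1, v.2.2)]))
      (c, s, f)
    = (c + (values.length : Int), s + (values.map (fun v => v.2.1)).sum,
       f ++ values.map (fun v => (v.1, v.2.1, v.2.2))) := by
  induction values generalizing c s f with
  | nil => simp
  | cons hd tl ih =>
    simp only [List.foldl_cons, ih, List.map_cons, List.length_cons, List.sum_cons]
    refine Prod.ext ?_ (Prod.ext ?_ ?_) <;> simp <;> ring

-- ===== VERDICT (by name: the statement is the Claim_ definition above) =====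
theorem count_ratings_users_freq_spec : Claim_equal_count_ratings_users_freq := by
  intro user_id values _
  unfold Spec_count_ratings_users_freq count_ratings_users_freq count_ratings_users_freq_alt
  simp [crufA_foldl, crufGo_eq values.length values le_rfl]
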